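-- pv_equiv track=rewrite | github.com/JosephOIbrahim/Synapse | python/synapse/panel/network_trace.py | _compute_attrib_delta
-- ===== SOURCE A (Python) =====
-- from typing import Any, Dict, List, Optional
--
-- def _compute_attrib_delta(input_geo: Optional[Dict], output_geo: Optional[Dict]) -> str:
--     """Describe attribute changes between input and output geometry."""
--     if input_geo is None or output_geo is None:
--         return "no change"
--
--     def _all_attribs(geo_dict: Dict) -> set:
--         attribs = geo_dict.get("attribs", {})
--         result: set = set()
--         for owner in ("point", "prim", "vertex", "detail"):
--             for name in attribs.get(owner, []):
--                 result.add(f"{owner}:{name}")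
--         return result
--
--     before = _all_attribs(input_geo)
--     after = _all_attribs(output_geo)
--     added = after - before
--     removed = before - after
--
--     parts: List[str] = []
--     if added:
--         # Strip owner prefix for readability -- just show attribute names
--         names = sorted({a.split(":", 1)[1] for a in added})
--         parts.append("+" + ", +".join(names))
--     if removed:
--         names = sorted({r.split(":", 1)[1] for r in removed})
--         parts.append("-" + ", -".join(names))
--
--     return ", ".join(parts) if parts else "no change"
-- ===== SOURCE B (Python) =====
-- from typing import Dict, Optional
--
--
-- def _compute_attrib_delta(input_geo: Optional[Dict], output_geo: Optional[Dict]) -> str: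
--     """Describe attribute changes between input and output geometry."""
--     if input_geo is None or output_geo is None:
--         return "no change"
--
--     in_attribs = input_geo.get("attribs", {})
--     out_attribs = output_geo.get("attribs", {})
--
--     removed_names: set = set()
--     added_names: set = set()
--     for owner in ("point", "prim", "vertex", "detail"):
--         b = sorted(set(in_attribs.get(owner, [])))
--         a = sorted(set(out_attribs.get(owner, [])))
--         # two-pointer merge of the two sorted, duplicate-free name lists
--         i = j = 0
--         while i < len(b) and j < len(a):
--             if b[i] == a[j]:
--                 i += 1
--                 j += 1
--             elif b[i] < a[j]:
--                 removed_names.add(b[i])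
--                 i += 1
--             else:
--                 added_names.add(a[j])
--                 j += 1
--         removed_names.update(b[i:])
--         added_names.update(a[j:])
--
--     parts = []
--     if added_names:
--         parts.append("+" + ", +".join(sorted(added_names)))
--     if removed_names:
--         parts.append("-" + ", -".join(sorted(removed_names)))
--     return ", ".join(parts) if parts else "no change"
-- ===== Notes on version B (the rewrite author's own statement) =====
-- stated objective: alternative
-- what changed: Replaces A's tagged 'owner:name' hash-set subtraction (build 'owner:name' strings, subtract sets, split the tags back off) by a sort-then-merge: per owner the two duplicate-free name lists are sorted and a two-pointer merge scan emits the names unique to each side directly.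
import Mathlib
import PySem

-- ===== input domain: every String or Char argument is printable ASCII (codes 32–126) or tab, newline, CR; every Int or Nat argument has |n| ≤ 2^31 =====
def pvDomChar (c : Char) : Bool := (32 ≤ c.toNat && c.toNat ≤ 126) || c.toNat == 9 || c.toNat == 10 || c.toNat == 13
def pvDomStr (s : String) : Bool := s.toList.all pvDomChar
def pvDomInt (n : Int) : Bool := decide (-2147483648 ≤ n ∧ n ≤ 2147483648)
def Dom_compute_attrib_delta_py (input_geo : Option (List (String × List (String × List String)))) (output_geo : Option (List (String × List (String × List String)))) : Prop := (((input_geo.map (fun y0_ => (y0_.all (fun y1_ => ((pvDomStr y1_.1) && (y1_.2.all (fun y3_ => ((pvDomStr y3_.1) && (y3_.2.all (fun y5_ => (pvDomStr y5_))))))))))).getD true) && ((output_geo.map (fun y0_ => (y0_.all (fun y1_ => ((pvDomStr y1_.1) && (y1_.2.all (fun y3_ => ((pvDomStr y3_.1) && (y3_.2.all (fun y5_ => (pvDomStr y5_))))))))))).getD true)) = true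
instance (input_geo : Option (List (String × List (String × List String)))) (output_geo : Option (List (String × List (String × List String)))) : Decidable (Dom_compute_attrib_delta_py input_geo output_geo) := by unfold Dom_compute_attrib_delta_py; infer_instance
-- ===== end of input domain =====

-- B replaces A's tagged 'owner:name' hash-set subtraction by a per-owner sort-then-merge:
-- the two duplicate-free name lists are sorted and a two-pointer merge scan emits the
-- names unique to each side directly (objective: alternative algorithm).

-- ===== PORT A =====
-- the tuple ("point", "prim", "vertex", "detail")
def pvOwners : List String := ["point", "prim", "vertex", "detail"]

-- f"{owner}:{name}"
def pvTag (owner name : String) : String := PySem.Str.join "" [owner, ":", name]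

-- a.split(":", 1)[1] — every element A applies this to contains ':', so the list has two
-- elements and index 1 always exists; getD 1 "" is exact there
def pvStripOwner (a : String) : String := ((PySem.Str.splitMax? a ":" 1).getD []).getD 1 ""

-- the nested helper _all_attribs (dict.get = first-match lookup in the association list)
def pvAllAttribs (geo_dict : List (String × List (String × List String))) : PySem.Set String :=
  let attribs := (List.lookup "attribs" geo_dict).getD []
  pvOwners.foldl
    (fun result owner =>
      ((List.lookup owner attribs).getD []).foldl
        (fun result name => PySem.Set.add result (pvTag owner name)) result)
    PySem.Set.empty

def compute_attrib_delta_py (input_geo : Option (List (String × List (String × List String)))) (output_geo : Option (List (String × List (String × List String)))) : String :=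
  match input_geo, output_geo with
  | some ig, some og =>
    let before := pvAllAttribs ig
    let after := pvAllAttribs og
    let added := PySem.Set.diff after before
    let removed := PySem.Set.diff before after
    let parts : List String := []
    let parts := if added = [] then parts else
      parts ++ [PySem.Str.join "" ["+", PySem.Str.join ", +"
        (PySem.List.sorted (PySem.Set.ofList (added.map pvStripOwner)) (fun x => x))]]
    let parts := if removed = [] then parts else
      parts ++ [PySem.Str.join "" ["-", PySem.Str.join ", -"
        (PySem.List.sorted (PySem.Set.ofList (removed.map pvStripOwner)) (fun x => x))]]
    if parts = [] then "no change" else PySem.Str.join ", " parts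
  | _, _ => "no change"

-- ===== PORT B =====
-- B's own copy of the owner tuple ("point", "prim", "vertex", "detail")
def pvOwnersB : List String := ["point", "prim", "vertex", "detail"]

-- the two-pointer merge loop: b, a are the (remaining) sorted duplicate-free name lists;
-- the while-loop runs while both are nonempty, the two trailing set.update calls are the
-- base cases (b[i:] into removed_names, a[j:] into added_names)
def pvMergeDiff (b a : List String) (removed added : PySem.Set String) :
    PySem.Set String × PySem.Set String :=
  match b, a with
  | [], rest => (removed, rest.foldl PySem.Set.add added)
  | x :: b', [] => ((x :: b').foldl PySem.Set.add removed, added)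
  | x :: b', y :: a' =>
    if x = y then pvMergeDiff b' a' removed added
    else if x < y then pvMergeDiff b' (y :: a') (PySem.Set.add removed x) added
    else pvMergeDiff (x :: b') a' removed (PySem.Set.add added y)
termination_by b.length + a.length

def compute_attrib_delta_py_alt (input_geo : Option (List (String × List (String × List String)))) (output_geo : Option (List (String × List (String × List String)))) : String :=
  match input_geo with
  | none => "no change"
  | some ig =>
  match output_geo with
  | none => "no change"
  | some og =>
    let in_attribs := (List.lookup "attribs" ig).getD []
    let out_attribs := (List.lookup "attribs" og).getD []
    let sets := pvOwnersB.foldl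
      (fun (acc : PySem.Set String × PySem.Set String) owner =>
        let b := PySem.List.sorted (PySem.Set.ofList ((List.lookup owner in_attribs).getD [])) (fun x => x)
        let a := PySem.List.sorted (PySem.Set.ofList ((List.lookup owner out_attribs).getD [])) (fun x => x)
        pvMergeDiff b a acc.1 acc.2)
      (PySem.Set.empty, PySem.Set.empty)
    let parts : List String := []
    let parts := if sets.2 = [] then parts else
      parts ++ [PySem.Str.join "" ["+", PySem.Str.join ", +" (PySem.List.sorted sets.2 (fun x => x))]]
    let parts := if sets.1 = [] then parts else
      parts ++ [PySem.Str.join "" ["-", PySem.Str.join ", -" (PySem.List.sorted sets.1 (fun x => x))]]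
    if parts = [] then "no change" else PySem.Str.join ", " parts

-- ===== PRECONDITION & SPEC =====
def Spec_compute_attrib_delta_py (input_geo : Option (List (String × List (String × List String)))) (output_geo : Option (List (String × List (String × List String)))) (out : String) : Prop := out = compute_attrib_delta_py_alt input_geo output_geo
instance (input_geo : Option (List (String × List (String × List String)))) (output_geo : Option (List (String × List (String × List String)))) (out : String) : Decidable (Spec_compute_attrib_delta_py input_geo output_geo out) := by unfold Spec_compute_attrib_delta_py; infer_instance

-- ===== CLAIM (what is proved, stated in full; the proofs are below) =====
def Claim_equal_compute_attrib_delta_py : Prop := ∀ (input_geo : Option (List (String × List (String × List String)))) (output_geo : Option (List (String × List (String × List String)))), Dom_compute_attrib_delta_py input_geo output_geo → Spec_compute_attrib_delta_py input_geo output_geo (compute_attrib_delta_py input_geo output_geo)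

-- ===== LEMMAS AND PROOFS =====

-- first-match lookup of owner `o`'s attribute-name list in geometry dict `geo`
def pvLk (geo : List (String × List (String × List String))) (o : String) : List String :=
  (List.lookup o ((List.lookup "attribs" geo).getD [])).getD []

-- splitOnMax.go with maxsplit exhausted returns the remainder as one last piece
lemma pv_go_zero (fuel : Nat) (l cur : List Char) (acc : List (List Char)) :
    PySem.Chars.splitOnMax.go [':'] fuel 0 l cur acc = ((cur.reverse ++ l) :: acc).reverse := by
  cases fuel with
  | zero => simp [PySem.Chars.splitOnMax.go]
  | succ f => cases l <;> simp [PySem.Chars.splitOnMax.go]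

lemma pv_go_colon (pre : List Char) (h : ':' ∉ pre) (n cur : List Char)
    (acc : List (List Char)) (fuel : Nat) (hf : pre.length < fuel) :
    PySem.Chars.splitOnMax.go [':'] fuel 1 (pre ++ ':' :: n) cur acc
      = (n :: (cur.reverse ++ pre) :: acc).reverse := by
  induction pre generalizing cur fuel with
  | nil =>
    cases fuel with
    | zero => omega
    | succ f =>
      simp [PySem.Chars.splitOnMax.go, List.isPrefixOf, pv_go_zero]
  | cons c pre' ih =>
    cases fuel with
    | zero => simp at hf
    | succ f =>
      have hc : c ≠ ':' := by intro e; exact h (by simp [e])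
      have h' : ':' ∉ pre' := fun e => h (by simp [e])
      simp only [List.cons_append, PySem.Chars.splitOnMax.go]
      rw [if_neg (by omega)]
      rw [if_neg (by simp [List.isPrefixOf]; intro e; exact absurd e.symm hc)]
      rw [ih h' (c :: cur) f (by simp at hf ⊢; omega)]
      simp

-- s.split(":", 1) on a string with exactly one leading-section colon
lemma pv_splitOnMax_colon (pre : List Char) (h : ':' ∉ pre) (n : List Char) :
    PySem.Chars.splitOnMax (pre ++ ':' :: n) [':'] 1 = [pre, n] := by
  rw [PySem.Chars.splitOnMax]
  rw [if_neg (by omega)]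
  have h1 : (1 : Int).toNat = 1 := rfl
  rw [h1, pv_go_colon pre h n [] [] _ (by simp)]
  simp

lemma pvTag_toList (o n : String) :
    (pvTag o n).toList = o.toList ++ ':' :: n.toList := by
  simp [pvTag, PySem.Str.toList_join, PySem.Chars.join, List.intercalate]

-- stripping the owner prefix recovers the raw attribute name
lemma pvStripOwner_tag (o : String) (ho : ':' ∉ o.toList) (n : String) :
    pvStripOwner (pvTag o n) = n := by
  unfold pvStripOwner
  rw [PySem.Str.splitMax?, PySem.Chars.splitMax?]
  rw [if_neg (by decide)]
  have hsep : (":" : String).toList = [':'] := by decide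
  rw [hsep, pvTag_toList, pv_splitOnMax_colon o.toList ho n.toList]
  simp [String.ofList_toList]

lemma pv_colon_split_inj (p : List Char) (hp : ':' ∉ p) :
    ∀ (q a b : List Char), ':' ∉ q → p ++ ':' :: a = q ++ ':' :: b → p = q ∧ a = b := by
  induction p with
  | nil =>
    intro q a b hq he
    cases q with
    | nil => simpa using he
    | cons c q' =>
      exfalso
      simp at he
      exact hq (by simp [he.1.symm])
  | cons c p' ih =>
    intro q a b hq he
    cases q with
    | nil =>
      exfalso
      simp at he
      exact hp (by simp [he.1])
    | cons d q' =>
      simp at he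
      have h1 : ':' ∉ p' := fun e => hp (by simp [e])
      have h2 : ':' ∉ q' := fun e => hq (by simp [e])
      obtain ⟨e1, e2⟩ := ih h1 q' a b h2 he.2
      exact ⟨by simp [he.1, e1], e2⟩

-- tags of colon-free owners are injective in both components
lemma pvTag_inj (o o' : String) (ho : ':' ∉ o.toList) (ho' : ':' ∉ o'.toList) (n m : String) :
    pvTag o n = pvTag o' m ↔ o = o' ∧ n = m := by
  constructor
  · intro h
    have h2 := congrArg String.toList h
    rw [pvTag_toList, pvTag_toList] at h2
    obtain ⟨e1, e2⟩ := pv_colon_split_inj o.toList ho o'.toList n.toList m.toList ho' h2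
    constructor
    · calc o = String.ofList o.toList := String.ofList_toList.symm
        _ = String.ofList o'.toList := by rw [e1]
        _ = o' := String.ofList_toList
    · calc n = String.ofList n.toList := String.ofList_toList.symm
        _ = String.ofList m.toList := by rw [e2]
        _ = m := String.ofList_toList
  · rintro ⟨rfl, rfl⟩; rfl

lemma pvOwners_colon_free : ∀ o ∈ pvOwners, ':' ∉ o.toList := by decide

-- membership in A's tagged set
lemma pv_mem_allAttribs (geo : List (String × List (String × List String))) (t : String) :
    t ∈ pvAllAttribs geo ↔ ∃ o ∈ pvOwners, ∃ m ∈ pvLk geo o, t = pvTag o m := by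
  simp only [pvAllAttribs, pvOwners, List.foldl, ← PySem.Set.update_map_eq_foldl_add]
  simp only [PySem.Set.mem_update, PySem.Set.empty, List.mem_map, List.not_mem_nil, false_or]
  simp [pvLk, eq_comm, or_assoc]

-- A's stripped added/removed name set has exactly the per-owner-difference members
lemma pv_mem_stripped_diff (g1 g2 : List (String × List (String × List String))) (y : String) :
    y ∈ PySem.Set.ofList (((pvAllAttribs g1).diff (pvAllAttribs g2)).map pvStripOwner)
      ↔ ∃ o ∈ pvOwners, y ∈ pvLk g1 o ∧ y ∉ pvLk g2 o := by
  rw [PySem.Set.mem_ofList]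
  simp only [List.mem_map, PySem.Set.mem_diff, pv_mem_allAttribs]
  constructor
  · rintro ⟨t, ⟨⟨o, ho, m, hm, rfl⟩, hnot⟩, rfl⟩
    have hcf := pvOwners_colon_free o ho
    rw [pvStripOwner_tag o hcf m]
    exact ⟨o, ho, hm, fun hmem => hnot ⟨o, ho, m, hmem, rfl⟩⟩
  · rintro ⟨o, ho, hy, hny⟩
    have hcf := pvOwners_colon_free o ho
    refine ⟨pvTag o y, ⟨⟨o, ho, y, hy, rfl⟩, ?_⟩, pvStripOwner_tag o hcf y⟩
    rintro ⟨o', ho', m', hm', he⟩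
    obtain ⟨eo, em⟩ := (pvTag_inj o o' hcf (pvOwners_colon_free o' ho') y m').mp he
    subst em
    rw [← eo] at hm'
    exact hny hm'

-- folding Set.add over a list adds exactly its members
lemma pv_mem_foldl_add (l : List String) (s : PySem.Set String) (x : String) :
    x ∈ l.foldl PySem.Set.add s ↔ x ∈ s ∨ x ∈ l := by
  induction l generalizing s with
  | nil => simp
  | cons h t ih => simp [ih, PySem.Set.mem_add, or_assoc, or_comm, or_left_comm]

lemma pv_nodup_foldl_add (l : List String) (s : PySem.Set String) (hs : s.Nodup) :
    (l.foldl PySem.Set.add s).Nodup := by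
  induction l generalizing s with
  | nil => exact hs
  | cons h t ih => exact ih _ (PySem.Set.nodup_add _ _ hs)

-- the merge loop: its two accumulators collect exactly the one-sided elements of the
-- two strictly increasing input lists, and stay duplicate-free
lemma pvMergeDiff_spec (b a : List String) (hb : b.Pairwise (· < ·)) (ha : a.Pairwise (· < ·))
    (r ad : PySem.Set String) (hr : r.Nodup) (had : ad.Nodup) :
    (∀ x, x ∈ (pvMergeDiff b a r ad).1 ↔ x ∈ r ∨ (x ∈ b ∧ x ∉ a)) ∧
    (∀ x, x ∈ (pvMergeDiff b a r ad).2 ↔ x ∈ ad ∨ (x ∈ a ∧ x ∉ b)) ∧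
    (pvMergeDiff b a r ad).1.Nodup ∧ (pvMergeDiff b a r ad).2.Nodup := by
  fun_induction pvMergeDiff b a r ad with
  | case1 r ad rest =>
    exact ⟨fun x => by simp, fun x => by simp [pv_mem_foldl_add], hr,
      pv_nodup_foldl_add _ _ had⟩
  | case2 r ad x b' =>
    exact ⟨fun z => by simp [pv_mem_foldl_add, or_assoc], fun z => by simp,
      pv_nodup_foldl_add _ _ hr, had⟩
  | case3 r ad b' y a' ih =>
    obtain ⟨h1, h2, h3, h4⟩ := ih (hb.sublist (List.sublist_cons_self y b'))
      (ha.sublist (List.sublist_cons_self y a')) hr had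
    have hbx : ∀ z ∈ b', y < z := fun z hz => (List.pairwise_cons.mp hb).1 z hz
    have hax : ∀ z ∈ a', y < z := fun z hz => (List.pairwise_cons.mp ha).1 z hz
    refine ⟨fun z => ?_, fun z => ?_, h3, h4⟩
    · rw [h1 z]
      constructor
      · rintro (h | ⟨hzb, hza⟩)
        · exact Or.inl h
        · exact Or.inr ⟨List.mem_cons_of_mem _ hzb, by
            simp only [List.mem_cons, not_or]
            exact ⟨fun e => absurd (e ▸ hbx z hzb) (lt_irrefl z), hza⟩⟩
      · rintro (h | ⟨hzb, hza⟩)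
        · exact Or.inl h
        · rcases List.mem_cons.mp hzb with rfl | hzb'
          · exact absurd (List.mem_cons_self) (fun h => hza h)
          · exact Or.inr ⟨hzb', fun h => hza (List.mem_cons_of_mem _ h)⟩
    · rw [h2 z]
      constructor
      · rintro (h | ⟨hza, hzb⟩)
        · exact Or.inl h
        · exact Or.inr ⟨List.mem_cons_of_mem _ hza, by
            simp only [List.mem_cons, not_or]
            exact ⟨fun e => absurd (e ▸ hax z hza) (lt_irrefl z), hzb⟩⟩
      · rintro (h | ⟨hza, hzb⟩)
        · exact Or.inl h
        · rcases List.mem_cons.mp hza with rfl | hza'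
          · exact absurd (List.mem_cons_self) (fun h => hzb h)
          · exact Or.inr ⟨hza', fun h => hzb (List.mem_cons_of_mem _ h)⟩
  | case4 r ad x b' y a' hne hlt ih =>
    obtain ⟨h1, h2, h3, h4⟩ := ih (hb.sublist (List.sublist_cons_self x b')) ha
      (PySem.Set.nodup_add _ _ hr) had
    have hxa : x ∉ y :: a' := by
      intro hx
      rcases List.mem_cons.mp hx with rfl | hx'
      · exact hne rfl
      · exact absurd (lt_trans hlt ((List.pairwise_cons.mp ha).1 x hx')) (lt_irrefl x)
    refine ⟨fun z => ?_, fun z => ?_, h3, h4⟩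
    · rw [h1 z, PySem.Set.mem_add]
      constructor
      · rintro ((h | rfl) | ⟨hzb, hza⟩)
        · exact Or.inl h
        · exact Or.inr ⟨List.mem_cons_self, hxa⟩
        · exact Or.inr ⟨List.mem_cons_of_mem _ hzb, hza⟩
      · rintro (h | ⟨hzb, hza⟩)
        · exact Or.inl (Or.inl h)
        · rcases List.mem_cons.mp hzb with rfl | hzb'
          · exact Or.inl (Or.inr rfl)
          · exact Or.inr ⟨hzb', hza⟩
    · rw [h2 z]
      constructor
      · rintro (h | ⟨hza, hzb⟩)
        · exact Or.inl h
        · refine Or.inr ⟨hza, ?_⟩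
          simp only [List.mem_cons, not_or]
          refine ⟨?_, hzb⟩
          rintro rfl
          rcases List.mem_cons.mp hza with e | hz'
          · exact hne e
          · exact absurd (lt_trans hlt ((List.pairwise_cons.mp ha).1 z hz')) (lt_irrefl z)
      · rintro (h | ⟨hza, hzb⟩)
        · exact Or.inl h
        · exact Or.inr ⟨hza, fun h => hzb (List.mem_cons_of_mem _ h)⟩
  | case5 r ad x b' y a' hne hnlt ih =>
    obtain ⟨h1, h2, h3, h4⟩ := ih hb (ha.sublist (List.sublist_cons_self y a')) hr
      (PySem.Set.nodup_add _ _ had)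
    have hylt : y < x := by
      rcases lt_trichotomy x y with h | h | h
      · exact absurd h hnlt
      · exact absurd h hne
      · exact h
    have hyb : y ∉ x :: b' := by
      intro hy
      rcases List.mem_cons.mp hy with rfl | hy'
      · exact hne rfl
      · exact absurd (lt_trans hylt ((List.pairwise_cons.mp hb).1 y hy')) (lt_irrefl y)
    refine ⟨fun z => ?_, fun z => ?_, h3, h4⟩
    · rw [h1 z]
      constructor
      · rintro (h | ⟨hzb, hza⟩)
        · exact Or.inl h
        · refine Or.inr ⟨hzb, ?_⟩
          simp only [List.mem_cons, not_or]
          refine ⟨?_, hza⟩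
          rintro rfl
          rcases List.mem_cons.mp hzb with e | hz'
          · exact hne e.symm
          · exact absurd (lt_trans hylt ((List.pairwise_cons.mp hb).1 z hz')) (lt_irrefl z)
      · rintro (h | ⟨hzb, hza⟩)
        · exact Or.inl h
        · exact Or.inr ⟨hzb, fun h => hza (List.mem_cons_of_mem _ h)⟩
    · rw [h2 z, PySem.Set.mem_add]
      constructor
      · rintro ((h | rfl) | ⟨hza, hzb⟩)
        · exact Or.inl h
        · exact Or.inr ⟨List.mem_cons_self, hyb⟩
        · exact Or.inr ⟨List.mem_cons_of_mem _ hza, hzb⟩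
      · rintro (h | ⟨hza, hzb⟩)
        · exact Or.inl (Or.inl h)
        · rcases List.mem_cons.mp hza with rfl | hza'
          · exact Or.inl (Or.inr rfl)
          · exact Or.inr ⟨hza', hzb⟩

-- the sorted duplicate-free per-owner lists B merges
def pvSL (geo : List (String × List (String × List String))) (o : String) : List String :=
  PySem.List.sorted (PySem.Set.ofList (pvLk geo o)) (fun x => x)

-- B's owner loop, on the abbreviations
def pvBFold (ig og : List (String × List (String × List String))) :
    PySem.Set String × PySem.Set String :=
  pvOwnersB.foldl (fun acc owner => pvMergeDiff (pvSL ig owner) (pvSL og owner) acc.1 acc.2)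
    (PySem.Set.empty, PySem.Set.empty)

lemma pv_mem_SL (geo : List (String × List (String × List String))) (o x : String) :
    x ∈ pvSL geo o ↔ x ∈ pvLk geo o := by
  simp [pvSL, PySem.List.mem_sorted, PySem.Set.mem_ofList]

-- B's accumulated pair after the owner loop: membership and nodup
lemma pv_BFold_spec (ig og : List (String × List (String × List String))) :
    (∀ x, x ∈ (pvBFold ig og).1 ↔ ∃ o ∈ pvOwnersB, x ∈ pvLk ig o ∧ x ∉ pvLk og o) ∧
    (∀ x, x ∈ (pvBFold ig og).2 ↔ ∃ o ∈ pvOwnersB, x ∈ pvLk og o ∧ x ∉ pvLk ig o) ∧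
    (pvBFold ig og).1.Nodup ∧ (pvBFold ig og).2.Nodup := by
  have step : ∀ (os : List String) (acc : PySem.Set String × PySem.Set String),
      acc.1.Nodup → acc.2.Nodup →
      (∀ x, x ∈ (os.foldl (fun acc owner => pvMergeDiff (pvSL ig owner) (pvSL og owner) acc.1 acc.2) acc).1
          ↔ x ∈ acc.1 ∨ ∃ o ∈ os, x ∈ pvLk ig o ∧ x ∉ pvLk og o) ∧
      (∀ x, x ∈ (os.foldl (fun acc owner => pvMergeDiff (pvSL ig owner) (pvSL og owner) acc.1 acc.2) acc).2
          ↔ x ∈ acc.2 ∨ ∃ o ∈ os, x ∈ pvLk og o ∧ x ∉ pvLk ig o) ∧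
      (os.foldl (fun acc owner => pvMergeDiff (pvSL ig owner) (pvSL og owner) acc.1 acc.2) acc).1.Nodup ∧
      (os.foldl (fun acc owner => pvMergeDiff (pvSL ig owner) (pvSL og owner) acc.1 acc.2) acc).2.Nodup := by
    intro os
    induction os with
    | nil => intro acc h1 h2; exact ⟨fun x => by simp, fun x => by simp, h1, h2⟩
    | cons o os ih =>
      intro acc h1 h2
      obtain ⟨m1, m2, n1, n2⟩ := pvMergeDiff_spec (pvSL ig o) (pvSL og o)
        (PySem.List.sorted_ofList_pairwise_lt _) (PySem.List.sorted_ofList_pairwise_lt _)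
        acc.1 acc.2 h1 h2
      obtain ⟨f1, f2, f3, f4⟩ := ih (pvMergeDiff (pvSL ig o) (pvSL og o) acc.1 acc.2) n1 n2
      refine ⟨fun x => ?_, fun x => ?_, f3, f4⟩
      · rw [List.foldl_cons, f1 x, m1 x]
        simp [pv_mem_SL, or_assoc]
      · rw [List.foldl_cons, f2 x, m2 x]
        simp [pv_mem_SL, or_assoc]
  obtain ⟨f1, f2, f3, f4⟩ := step pvOwnersB (PySem.Set.empty, PySem.Set.empty)
    List.nodup_nil List.nodup_nil
  exact ⟨fun x => by rw [pvBFold, f1 x]; simp [PySem.Set.empty],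
         fun x => by rw [pvBFold, f2 x]; simp [PySem.Set.empty], f3, f4⟩

lemma pv_ofList_eq_nil_iff {α : Type} [BEq α] [LawfulBEq α] (xs : List α) :
    PySem.Set.ofList xs = [] ↔ xs = [] := by
  cases xs with
  | nil => simp [PySem.Set.ofList_nil]
  | cons x xs => simp [PySem.Set.ofList_cons]

-- A's stripped name set is a permutation of the matching component of B's pair
-- (g1 = the side whose extra names are collected, g2 = the other side)
lemma pv_perm_fst (ig og : List (String × List (String × List String))) :
    (PySem.Set.ofList (((pvAllAttribs ig).diff (pvAllAttribs og)).map pvStripOwner)).Perm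
      (pvBFold ig og).1 := by
  obtain ⟨f1, _, f3, _⟩ := pv_BFold_spec ig og
  rw [List.perm_ext_iff_of_nodup (PySem.Set.nodup_ofList _) f3]
  intro y
  rw [pv_mem_stripped_diff, f1 y]
  rfl

lemma pv_perm_snd (ig og : List (String × List (String × List String))) :
    (PySem.Set.ofList (((pvAllAttribs og).diff (pvAllAttribs ig)).map pvStripOwner)).Perm
      (pvBFold ig og).2 := by
  obtain ⟨_, f2, _, f4⟩ := pv_BFold_spec ig og
  rw [List.perm_ext_iff_of_nodup (PySem.Set.nodup_ofList _) f4]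
  intro y
  rw [pv_mem_stripped_diff, f2 y]
  rfl

-- emptiness of A's diff set matches emptiness of B's corresponding name set
lemma pv_empty_of_perm (d : PySem.Set String) (s : PySem.Set String)
    (hp : (PySem.Set.ofList (d.map pvStripOwner)).Perm s) : (d = []) ↔ (s = []) := by
  constructor
  · intro h
    rw [h] at hp
    have h0 : PySem.Set.ofList (List.map pvStripOwner []) = ([] : List String) := rfl
    rw [h0] at hp
    exact hp.symm.eq_nil
  · intro h
    rw [h] at hp
    have := hp.eq_nil
    rw [pv_ofList_eq_nil_iff, List.map_eq_nil_iff] at this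
    exact this

lemma pv_main (ig og : List (String × List (String × List String))) :
    compute_attrib_delta_py (some ig) (some og) = compute_attrib_delta_py_alt (some ig) (some og) := by
  have hf : (pvOwnersB.foldl
      (fun (acc : PySem.Set String × PySem.Set String) owner =>
        pvMergeDiff
          (PySem.List.sorted (PySem.Set.ofList ((List.lookup owner ((List.lookup "attribs" ig).getD [])).getD [])) (fun x => x))
          (PySem.List.sorted (PySem.Set.ofList ((List.lookup owner ((List.lookup "attribs" og).getD [])).getD [])) (fun x => x))
          acc.1 acc.2)
      (PySem.Set.empty, PySem.Set.empty)) = pvBFold ig og := by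
    simp [pvBFold, pvSL, pvLk]
  show (let added := PySem.Set.diff (pvAllAttribs og) (pvAllAttribs ig)
    let removed := PySem.Set.diff (pvAllAttribs ig) (pvAllAttribs og)
    let parts : List String := []
    let parts := if added = [] then parts else
      parts ++ [PySem.Str.join "" ["+", PySem.Str.join ", +"
        (PySem.List.sorted (PySem.Set.ofList (added.map pvStripOwner)) (fun x => x))]]
    let parts := if removed = [] then parts else
      parts ++ [PySem.Str.join "" ["-", PySem.Str.join ", -"
        (PySem.List.sorted (PySem.Set.ofList (removed.map pvStripOwner)) (fun x => x))]]
    if parts = [] then "no change" else PySem.Str.join ", " parts) = _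
  simp only []
  conv_rhs =>
    rw [compute_attrib_delta_py_alt]
    simp only [hf]
  rw [PySem.List.sorted_eq_sorted_of_perm _ _ _ (fun _ _ h => h) (pv_perm_snd ig og),
      PySem.List.sorted_eq_sorted_of_perm _ _ _ (fun _ _ h => h) (pv_perm_fst ig og)]
  have e2 := pv_empty_of_perm _ _ (pv_perm_snd ig og)
  have e1 := pv_empty_of_perm _ _ (pv_perm_fst ig og)
  simp only [e1, e2]

-- ===== VERDICT (by name: the statement is the Claim_ definition above) =====
theorem compute_attrib_delta_py_spec : Claim_equal_compute_attrib_delta_py := by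
  intro input_geo output_geo _
  unfold Spec_compute_attrib_delta_py
  cases input_geo with
  | none => cases output_geo <;> rfl
  | some ig =>
    cases output_geo with
    | none => rfl
    | some og => exact pv_main ig og
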